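-- pv_equiv track=rewrite | github.com/aannabottini/eserciziPython | es2.py | venditaMax
-- ===== SOURCE A (Python) =====
-- def venditaMax(tupla_vendite):
--     max=0
--     valori_max=[]
--     #trovo il valore massimo
--     for materia, prodotto in tupla_vendite:
--         if(prodotto[1][1]>max):
--             max=prodotto[1][1]
--     #riempimento dell'array valori_max
--     for materia, prodotto in tupla_vendite:
--         if(prodotto[1][1]==max):
--             valori_max.append(prodotto[0])
--     return(max,valori_max)
-- ===== SOURCE B (Python) =====
-- def venditaMax(tupla_vendite):
--     max_v = 0
--     valori_max = []
--     for materia, prodotto in tupla_vendite: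
--         v = prodotto[1][1]
--         if v > max_v:
--             max_v = v
--             valori_max = [prodotto[0]]
--         elif v == max_v:
--             valori_max.append(prodotto[0])
--     return (max_v, valori_max)
-- ===== Notes on version B (the rewrite author's own statement) =====
-- stated objective: simpler
-- what changed: Fuses A's two scans into a single pass that tracks the running maximum and rebuilds the name list on each new maximum.
import Mathlib
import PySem

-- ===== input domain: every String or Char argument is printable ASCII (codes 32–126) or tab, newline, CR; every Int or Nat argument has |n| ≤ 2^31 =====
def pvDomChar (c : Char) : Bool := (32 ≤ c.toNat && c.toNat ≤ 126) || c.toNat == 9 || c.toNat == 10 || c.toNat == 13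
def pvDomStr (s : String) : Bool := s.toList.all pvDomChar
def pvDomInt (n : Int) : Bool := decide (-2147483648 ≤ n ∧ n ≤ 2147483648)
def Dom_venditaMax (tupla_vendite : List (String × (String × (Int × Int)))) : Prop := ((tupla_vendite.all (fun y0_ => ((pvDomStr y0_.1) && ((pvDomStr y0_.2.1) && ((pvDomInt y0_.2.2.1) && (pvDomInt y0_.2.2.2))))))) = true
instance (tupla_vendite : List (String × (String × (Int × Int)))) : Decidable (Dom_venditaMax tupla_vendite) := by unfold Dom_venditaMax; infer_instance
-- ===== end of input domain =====

-- B fuses A's two scans into one pass that tracks the running maximum and rebuilds the name list.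

-- ===== PORT A =====
-- A: first loop finds the max of prodotto[1][1] starting from 0, second loop collects prodotto[0] of entries equal to it.
def venditaMax (tupla_vendite : List (String × (String × (Int × Int)))) : Int × List String :=
  let max := tupla_vendite.foldl (fun m pr => if pr.2.2.2 > m then pr.2.2.2 else m) 0
  let valori_max := tupla_vendite.foldl (fun acc pr => if pr.2.2.2 = max then acc ++ [pr.2.1] else acc) []
  (max, valori_max)

-- ===== PORT B =====
-- B: single pass; on a strictly larger value reset the list, on an equal value append.
def venditaMax_alt (tupla_vendite : List (String × (String × (Int × Int)))) : Int × List String :=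
  tupla_vendite.foldl
    (fun st pr =>
      if pr.2.2.2 > st.1 then (pr.2.2.2, [pr.2.1])
      else if pr.2.2.2 = st.1 then (st.1, st.2 ++ [pr.2.1])
      else st)
    ((0 : Int), ([] : List String))

-- ===== PRECONDITION & SPEC =====
def Spec_venditaMax (tupla_vendite : List (String × (String × (Int × Int)))) (out : Int × List String) : Prop := out = venditaMax_alt tupla_vendite
instance (tupla_vendite : List (String × (String × (Int × Int)))) (out : Int × List String) : Decidable (Spec_venditaMax tupla_vendite out) := by unfold Spec_venditaMax; infer_instance

-- ===== CLAIM (what is proved, stated in full; the proofs are below) =====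
def Claim_equal_venditaMax : Prop := ∀ (tupla_vendite : List (String × (String × (Int × Int)))), Dom_venditaMax tupla_vendite → Spec_venditaMax tupla_vendite (venditaMax tupla_vendite)

-- ===== LEMMAS AND PROOFS =====

-- A's first loop, generalized over the start value.
def pvMaxF (l : List (String × (String × (Int × Int)))) (m0 : Int) : Int :=
  l.foldl (fun m pr => if pr.2.2.2 > m then pr.2.2.2 else m) m0

lemma pvMaxF_le (l : List (String × (String × (Int × Int)))) (m0 : Int) : m0 ≤ pvMaxF l m0 := by
  induction l generalizing m0 with
  | nil => simp [pvMaxF]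
  | cons p t ih =>
    simp only [pvMaxF, List.foldl_cons]
    split_ifs with h
    · exact le_trans (le_of_lt h) (ih _)
    · exact ih _

-- B's loop from an arbitrary state: the max is pvMaxF, and the list is the names of all entries
-- hitting that max, prefixed by the incoming accumulator exactly when the max did not move.
lemma bLoop_spec (l : List (String × (String × (Int × Int)))) (m0 : Int) (acc0 : List String) :
    l.foldl (fun st pr =>
      if pr.2.2.2 > st.1 then (pr.2.2.2, [pr.2.1])
      else if pr.2.2.2 = st.1 then (st.1, st.2 ++ [pr.2.1])
      else st) (m0, acc0)
    = (pvMaxF l m0,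
       (if pvMaxF l m0 = m0 then acc0 else []) ++
         (l.filter (fun pr => pr.2.2.2 = pvMaxF l m0)).map (fun pr => pr.2.1)) := by
  induction l generalizing m0 acc0 with
  | nil => simp [pvMaxF]
  | cons p t ih =>
    have hM : pvMaxF (p :: t) m0 = pvMaxF t (if p.2.2.2 > m0 then p.2.2.2 else m0) := by
      simp only [pvMaxF, List.foldl_cons]
    by_cases h1 : p.2.2.2 > m0
    · have hMv : pvMaxF (p :: t) m0 = pvMaxF t p.2.2.2 := by rw [hM]; simp [h1]
      have hle : p.2.2.2 ≤ pvMaxF t p.2.2.2 := pvMaxF_le t _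
      have hne : pvMaxF (p :: t) m0 ≠ m0 := by rw [hMv]; omega
      simp only [List.foldl_cons, if_pos h1, ih, List.filter_cons]
      rw [hMv]
      have hne2 : pvMaxF t p.2.2.2 ≠ m0 := by omega
      by_cases h2 : p.2.2.2 = pvMaxF t p.2.2.2
      · rw [← h2]
        simp
        omega
      · simp [h2, hne2, Ne.symm h2]
    · have hle0 : m0 ≤ pvMaxF t m0 := pvMaxF_le t m0
      by_cases h2 : p.2.2.2 = m0
      · have hMv : pvMaxF (p :: t) m0 = pvMaxF t m0 := by rw [hM]; simp [h1]
        simp only [List.foldl_cons, if_neg h1, if_pos h2, ih, List.filter_cons]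
        rw [hMv]
        by_cases h3 : pvMaxF t m0 = m0
        · simp [h2, h3]
        · have : ¬ p.2.2.2 = pvMaxF t m0 := by omega
          simp [this, h3]
      · have hMv : pvMaxF (p :: t) m0 = pvMaxF t m0 := by rw [hM]; simp [h1]
        have hlt : p.2.2.2 < m0 := by omega
        have hne : ¬ p.2.2.2 = pvMaxF t m0 := by omega
        simp only [List.foldl_cons, if_neg h1, if_neg h2, ih, List.filter_cons]
        rw [hMv]
        simp [hne]

-- A's second loop is exactly filter-then-map of the names.
lemma aFill_spec (l : List (String × (String × (Int × Int)))) (M : Int) (acc0 : List String) :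
    l.foldl (fun acc pr => if pr.2.2.2 = M then acc ++ [pr.2.1] else acc) acc0
    = acc0 ++ (l.filter (fun pr => pr.2.2.2 = M)).map (fun pr => pr.2.1) := by
  induction l generalizing acc0 with
  | nil => simp
  | cons p t ih =>
    simp only [List.foldl_cons, List.filter_cons]
    by_cases h : p.2.2.2 = M
    · simp [h, ih]
    · simp [h, ih]

-- ===== VERDICT (by name: the statement is the Claim_ definition above) =====
theorem venditaMax_spec : Claim_equal_venditaMax := by
  intro l _
  show venditaMax l = venditaMax_alt l
  simp only [venditaMax, venditaMax_alt]
  rw [bLoop_spec l 0 [], aFill_spec]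
  by_cases h : pvMaxF l 0 = 0 <;> simp [pvMaxF]
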